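-- pv_equiv track=rewrite | github.com/porteg/adventofcode2025 | day6.py | operateSpecial
-- ===== SOURCE A (Python) =====
-- import math
--
-- SUM = "+"
--
-- MULTI = "*"
--
-- def operateSpecial(matrix):
--     grandTotal = 0
--
--     col = len(matrix[0]) - 1
--     l_numbers = []
--     while col >= 0:
--         number = ""
--         for row in range(0, len(matrix)):
--             value = matrix[row][col]
--             if row == len(matrix) - 1: # The last
--                 if not value == SUM and not value == MULTI:
--                     if not number.replace(" ", "") == "":
--                         l_numbers.append(number)
--                 else:
--                     if len(l_numbers) > 0:
--                         l_numbers.append(number)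
--                         l_numbers = list(map(int, l_numbers))
--                         if value == SUM:
--                             grandTotal += sum(l_numbers)
--                         else:
--                             grandTotal += math.prod(l_numbers)
--                         l_numbers = []
--                 col = col - 1
--                 break
--             else:
--                 number = number + value
--
--     return grandTotal
-- ===== SOURCE B (Python) =====
-- import math
--
-- def _flush(total, op, opstr, nums):
--     # an operator contributes only if at least one number column followed it
--     if op is not None and nums:
--         vals = list(map(int, nums + [opstr]))
--         total += sum(vals) if op == "+" else math.prod(vals)
--     return total
--
-- def operateSpecial(matrix):
--     # Left-to-right over columns: each operator column applies to the number
--     # columns that FOLLOW it (up to the next operator); sum/product commute,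
--     # so the grand total equals A's right-to-left accumulation.
--     bottom = matrix[-1]
--     cols = ["".join(row[c] for row in matrix[:-1]) for c in range(len(matrix[0]))]
--     total, op, opstr, nums = 0, None, "", []
--     for s, last in zip(cols, bottom):
--         if last == "+" or last == "*":
--             total = _flush(total, op, opstr, nums)
--             op, opstr, nums = last, s, []
--         elif s.replace(" ", "") != "":
--             nums.append(s)
--     return _flush(total, op, opstr, nums)
-- ===== Notes on version B (the rewrite author's own statement) =====
-- stated objective: alternative
-- what changed: A scans columns right-to-left, accumulating a group of number strings and firing it when it reaches an operator column; B scans columns left-to-right with a pending-operator state, deferring each operator until the number columns that follow it are collected and flushing at the next operator or at the end - correct because integer sum and product are commutative; B also builds each column string with one join instead of A's incremental concatenation.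
import Mathlib
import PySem

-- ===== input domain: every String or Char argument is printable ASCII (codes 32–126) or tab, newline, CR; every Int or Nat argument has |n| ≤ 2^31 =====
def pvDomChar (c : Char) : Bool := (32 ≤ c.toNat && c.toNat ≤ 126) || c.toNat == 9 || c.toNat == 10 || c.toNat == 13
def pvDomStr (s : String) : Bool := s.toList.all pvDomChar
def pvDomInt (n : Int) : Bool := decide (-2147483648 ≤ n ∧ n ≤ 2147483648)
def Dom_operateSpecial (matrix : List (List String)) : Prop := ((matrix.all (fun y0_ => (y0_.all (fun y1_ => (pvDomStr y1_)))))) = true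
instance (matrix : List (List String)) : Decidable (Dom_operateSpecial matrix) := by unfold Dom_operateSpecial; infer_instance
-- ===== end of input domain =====

-- B replaces A's right-to-left group-accumulate-and-fire scan by a left-to-right scan with a
-- pending operator and deferred flush, building each column string with one join (objective:
-- alternative; equal totals by commutativity of sum and product; measured faster).

-- ===== PORT A =====
-- matrix[row][col]; IndexError = none, the `getD` defaults are unreachable inside Pre_
def pvCellA (matrix : List (List String)) (row : Int) (col : Int) : String :=
  (PySem.List.pyGet? ((PySem.List.pyGet? matrix row).getD []) col).getD ""

-- the inner `for row in range(0, len(matrix))` loop, with its break at the last row;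
-- int(s) raising ValueError = none, the `getD 0` default is unreachable inside Pre_
def pvForA (matrix : List (List String)) (col : Int) (row : Nat) (number : String)
    (gt : Int) (lnum : List String) : Int × List String :=
  if h : row < matrix.length then
    let value := pvCellA matrix (row : Int) col
    if row = matrix.length - 1 then
      if value ≠ "+" ∧ value ≠ "*" then
        if ¬ (PySem.Str.replace number " " "" = "") then (gt, lnum ++ [number]) else (gt, lnum)
      else
        if lnum.length > 0 then
          let ints := (lnum ++ [number]).map (fun s => (PySem.Int.ofStr? s).getD 0)
          if value = "+" then (gt + ints.sum, ([] : List String))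
          else (gt + ints.prod, ([] : List String))
        else (gt, lnum)
    else pvForA matrix col (row + 1) (number ++ value) gt lnum
  else (gt, lnum)
termination_by matrix.length - row

-- the `while col >= 0` loop; Python decrements col inside the row loop's last-row branch,
-- which is reached on every iteration whenever the matrix is nonempty (the empty matrix
-- already raised at matrix[0] and is outside Pre_), so decrementing at the loop head is exact;
-- fuel makes the recursion total and is sufficient since col drops by 1 each pass
def pvWhileA (matrix : List (List String)) (gt : Int) (lnum : List String) (col : Int) :
    Nat → Int
  | 0 => gt
  | fuel + 1 =>
    if col ≥ 0 then
      let st := pvForA matrix col 0 "" gt lnum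
      pvWhileA matrix st.1 st.2 (col - 1) fuel
    else gt

def operateSpecial (matrix : List (List String)) : Int :=
  let col : Int := (((PySem.List.pyGet? matrix 0).getD []).length : Int) - 1
  pvWhileA matrix 0 [] col (col.toNat + 1)

-- ===== PORT B =====
-- B's `_flush`: an operator contributes only if at least one number column followed it
def pvFlushB (total : Int) (op : Option String) (opstr : String) (nums : List String) : Int :=
  match op with
  | some o =>
    if nums ≠ [] then
      let vals := (nums ++ [opstr]).map (fun x => (PySem.Int.ofStr? x).getD 0)
      total + (if o = "+" then vals.sum else vals.prod)
    else total
  | none => total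

-- the body of B's `for s, last in zip(cols, bottom)` loop; state (total, op, opstr, nums)
def pvStepB (st : Int × Option String × String × List String) (p : String × String) :
    Int × Option String × String × List String :=
  if p.2 = "+" ∨ p.2 = "*" then
    (pvFlushB st.1 st.2.1 st.2.2.1 st.2.2.2, some p.2, p.1, [])
  else if ¬ (PySem.Str.replace p.1 " " "" = "") then
    (st.1, st.2.1, st.2.2.1, st.2.2.2 ++ [p.1])
  else st

-- matrix[-1], matrix[0], row[c] raise (none) exactly outside Pre_; the getD defaults are unreachable
def operateSpecial_alt (matrix : List (List String)) : Int :=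
  let bottom := (PySem.List.pyGet? matrix (-1)).getD []
  let width : Int := (((PySem.List.pyGet? matrix 0).getD []).length : Int)
  let cols := (PySem.List.pyRange 0 width 1).map (fun c =>
    PySem.Str.join "" ((PySem.List.slice matrix none (some (-1))).map
      (fun row => (PySem.List.pyGet? row c).getD "")))
  let st := (cols.zip bottom).foldl pvStepB (0, none, "", ([] : List String))
  pvFlushB st.1 st.2.1 st.2.2.1 st.2.2.2

-- ===== PRECONDITION & SPEC =====
-- helpers for Pre_ (independent of both ports): the column string A converts, the last row's
-- char at a column, operator/active-column tests, and int-literal parseability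
def pvColStr (matrix : List (List String)) (c : Nat) : String :=
  PySem.Str.join "" (matrix.dropLast.map (fun row => row.getD c ""))
def pvLastRow (matrix : List (List String)) (c : Nat) : String :=
  (matrix.getLast?.getD []).getD c ""
def pvIsOp (matrix : List (List String)) (c : Nat) : Bool :=
  pvLastRow matrix c == "+" || pvLastRow matrix c == "*"
def pvActive (matrix : List (List String)) (c : Nat) : Bool :=
  !(PySem.Str.replace (pvColStr matrix c) " " "" == "")
def pvParses (s : String) : Bool := (PySem.Int.ofStr? s).isSome

-- Pre_ excludes exactly the inputs on which Python A raises: the empty matrix (IndexError at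
-- matrix[0]), a row shorter than the first row (IndexError at matrix[row][col]), and matrices
-- where int() is applied to a column string that is not a valid int literal, i.e. an operator
-- column whose group (the active non-operator columns to its right up to the next operator
-- column) is nonempty while it or a group member fails to parse (ValueError).
def Pre_operateSpecial (matrix : List (List String)) : Prop :=
  matrix ≠ [] ∧
  (∀ row ∈ matrix, (matrix.headD []).length ≤ row.length) ∧
  (∀ c ∈ List.range (matrix.headD []).length,
    pvIsOp matrix c = true →
    ∀ c' ∈ List.range (matrix.headD []).length,
      c < c' → pvIsOp matrix c' = false → pvActive matrix c' = true →
      (∀ c'' ∈ List.range (matrix.headD []).length, c < c'' → c'' < c' →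
        pvIsOp matrix c'' = false) →
      pvParses (pvColStr matrix c) = true ∧ pvParses (pvColStr matrix c') = true)
instance (matrix : List (List String)) : Decidable (Pre_operateSpecial matrix) := by
  unfold Pre_operateSpecial; infer_instance

def pvWitness_operateSpecial : List (List String) := [["1", "2"], ["3", "4"], ["+", " "]]

def Spec_operateSpecial (matrix : List (List String)) (out : Int) : Prop := out = operateSpecial_alt matrix
instance (matrix : List (List String)) (out : Int) : Decidable (Spec_operateSpecial matrix out) := by unfold Spec_operateSpecial; infer_instance

-- ===== CLAIM (what is proved, stated in full; the proofs are below) =====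
def Claim_equal_operateSpecial : Prop := ∀ (matrix : List (List String)), Dom_operateSpecial matrix → Pre_operateSpecial matrix → Spec_operateSpecial matrix (operateSpecial matrix)

-- ===== LEMMAS AND PROOFS =====

theorem pv_join_empty_nil : PySem.Str.join "" ([] : List String) = "" := by
  apply String.toList_inj.mp
  simp [PySem.Str.toList_join, PySem.Chars.join_nil]

theorem pv_join_empty_cons (p : String) (parts : List String) :
    PySem.Str.join "" (p :: parts) = p ++ PySem.Str.join "" parts := by
  apply String.toList_inj.mp
  cases parts with
  | nil => simp [PySem.Str.toList_join, PySem.Chars.join_nil, PySem.Chars.join_singleton]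
  | cons q rest =>
    rw [String.toList_append, PySem.Str.toList_join, PySem.Str.toList_join]
    simp [PySem.Chars.join_cons_cons]

-- proof-only helpers: A's per-column step on state (total, group) and the per-column pair
def pvStepA (st : Int × List String) (p : String × String) : Int × List String :=
  if p.2 = "+" ∨ p.2 = "*" then
    if st.2 ≠ [] then
      let ints := (st.2 ++ [p.1]).map (fun x => (PySem.Int.ofStr? x).getD 0)
      (st.1 + (if p.2 = "+" then ints.sum else ints.prod), ([] : List String))
    else st
  else if ¬ (PySem.Str.replace p.1 " " "" = "") then (st.1, st.2 ++ [p.1]) else st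

def pvPairB (matrix : List (List String)) (c : Int) : String × String :=
  (PySem.Str.join "" ((PySem.List.pyRange 0 ((matrix.length : Int) - 1) 1).map
      (fun r => pvCellA matrix r c)),
   pvCellA matrix ((matrix.length : Int) - 1) c)

def pvFinish (st : Int × Option String × String × List String) : Int :=
  pvFlushB st.1 st.2.1 st.2.2.1 st.2.2.2

-- the inner row loop of A computes exactly pvStepA applied to
-- (number ++ digits of the remaining rows, last-row char)
theorem pvForA_eq (matrix : List (List String)) (col : Int) :
    ∀ (k row : Nat), row + k + 1 = matrix.length →
    ∀ (number : String) (gt : Int) (lnum : List String),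
      pvForA matrix col row number gt lnum
        = pvStepA (gt, lnum)
            (number ++ PySem.Str.join ""
              ((PySem.List.pyRange (row : Int) ((matrix.length : Int) - 1) 1).map
                (fun r => pvCellA matrix r col)),
             pvCellA matrix ((matrix.length : Int) - 1) col) := by
  intro k
  induction k with
  | zero =>
    intro row hrow number gt lnum
    have hlt : row < matrix.length := by omega
    have hcast : ((row : Int)) = (matrix.length : Int) - 1 := by omega
    rw [pvForA, dif_pos hlt, if_pos (by omega : row = matrix.length - 1)]
    rw [PySem.List.pyRange_one_eq_nil (by omega), List.map_nil, pv_join_empty_nil,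
      String.append_empty, hcast]
    simp only [pvStepA]
    by_cases h1 : pvCellA matrix ((matrix.length : Int) - 1) col = "+" <;>
      by_cases h2 : pvCellA matrix ((matrix.length : Int) - 1) col = "*" <;>
      simp only [h1, h2] <;> split_ifs <;>
      simp_all [List.length_pos_iff]
  | succ k ih =>
    intro row hrow number gt lnum
    have hlt : row < matrix.length := by omega
    rw [pvForA, dif_pos hlt, if_neg (by omega : ¬ row = matrix.length - 1)]
    rw [ih (row + 1) (by omega)]
    rw [PySem.List.pyRange_one_cons (by omega : (row : Int) < (matrix.length : Int) - 1)]
    rw [List.map_cons, pv_join_empty_cons, ← String.append_assoc]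
    have : ((row : Nat) : Int) + 1 = ((row + 1 : Nat) : Int) := by omega
    rw [this]

-- the while loop of A is a fold of pvStepA over the columns col, col-1, …, 0
theorem pvWhileA_eq (matrix : List (List String)) (hm : matrix ≠ []) :
    ∀ (c : Nat) (gt : Int) (lnum : List String) (fuel : Nat), c < fuel →
      pvWhileA matrix gt lnum (c : Int) fuel
        = (((PySem.List.pyRange (c : Int) (-1) (-1)).map (pvPairB matrix)).foldl pvStepA
            (gt, lnum)).1 := by
  have hlen : 0 < matrix.length := List.length_pos_iff.mpr hm
  have hfor : ∀ (c : Int) (gt : Int) (lnum : List String),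
      pvForA matrix c 0 "" gt lnum = pvStepA (gt, lnum) (pvPairB matrix c) := by
    intro c gt lnum
    rw [pvForA_eq matrix c (matrix.length - 1) 0 (by omega)]
    simp [pvPairB, String.empty_append]
  intro c
  induction c with
  | zero =>
    intro gt lnum fuel hfuel
    obtain ⟨f, rfl⟩ : ∃ f, fuel = f + 1 := ⟨fuel - 1, by omega⟩
    simp only [Nat.cast_zero]
    rw [pvWhileA, if_pos (by omega), hfor]
    rw [PySem.List.pyRange_neg_one_cons (by omega : (-1 : Int) < 0),
      PySem.List.pyRange_neg_one_eq_nil (by omega : (0 : Int) - 1 ≤ -1)]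
    cases f with
    | zero => rw [pvWhileA]; rfl
    | succ f' => rw [pvWhileA, if_neg (by omega)]; rfl
  | succ c ih =>
    intro gt lnum fuel hfuel
    obtain ⟨f, rfl⟩ : ∃ f, fuel = f + 1 := ⟨fuel - 1, by omega⟩
    rw [pvWhileA, if_pos (by omega)]
    have hc1 : ((c + 1 : Nat) : Int) - 1 = (c : Int) := by omega
    simp only [hc1, ih _ _ f (by omega)]
    rw [PySem.List.pyRange_neg_one_cons (by omega : (-1 : Int) < ((c + 1 : Nat) : Int)), hc1]
    rw [List.map_cons, List.foldl_cons, hfor]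

-- pvFlushB splits off its running total
theorem pvFlushB_split (t : Int) (op : Option String) (opstr : String) (nums : List String) :
    pvFlushB t op opstr nums = t + pvFlushB 0 op opstr nums := by
  cases op with
  | none => simp [pvFlushB]
  | some o => simp only [pvFlushB]; split_ifs <;> ring

-- pvFlushB only depends on the multiset of group members (sum and product commute)
theorem pvFlushB_perm (op : Option String) (opstr : String) {l1 l2 : List String}
    (h : l1.Perm l2) : pvFlushB 0 op opstr l1 = pvFlushB 0 op opstr l2 := by
  cases op with
  | none => rfl
  | some o =>
    have hp : ((l1 ++ [opstr]).map (fun x => (PySem.Int.ofStr? x).getD 0)).Perm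
        ((l2 ++ [opstr]).map (fun x => (PySem.Int.ofStr? x).getD 0)) :=
      (h.append_right [opstr]).map _
    simp only [pvFlushB]
    rcases eq_or_ne l1 [] with h1 | h1
    · have h2 : l2 = [] := (h1 ▸ h : List.Perm [] l2).symm.eq_nil
      simp [h1, h2]
    · have h2 : l2 ≠ [] := fun hl => h1 ((hl ▸ h).eq_nil)
      simp only [ne_eq, h1, h2, not_false_iff, if_true]
      rw [hp.sum_eq, hp.prod_eq]

-- B's fold with a pending operator equals A's right fold plus the pending flush
theorem foldl_stepB_eq (P : List (String × String)) :
    ∀ (t : Int) (op : Option String) (opstr : String) (nums : List String),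
      pvFinish (P.foldl pvStepB (t, op, opstr, nums))
        = t + (P.foldr (fun p st => pvStepA st p) ((0 : Int), ([] : List String))).1
            + pvFlushB 0 op opstr
                (nums ++ (P.foldr (fun p st => pvStepA st p) ((0 : Int), ([] : List String))).2) := by
  induction P with
  | nil =>
    intro t op opstr nums
    simp [pvFinish, pvFlushB_split t op opstr nums]
  | cons p rest ih =>
    intro t op opstr nums
    obtain ⟨s, l⟩ := p
    rw [List.foldl_cons, List.foldr_cons]
    set ST := rest.foldr (fun p st => pvStepA st p) ((0 : Int), ([] : List String)) with hST
    by_cases hop : l = "+" ∨ l = "*"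
    · have hstep : pvStepB (t, op, opstr, nums) (s, l)
          = (pvFlushB t op opstr nums, some l, s, ([] : List String)) := by
        simp [pvStepB, hop]
      rw [hstep, ih]
      have hsnd : (pvStepA ST (s, l)).2 = [] := by
        by_cases h2 : ST.2 = [] <;> simp [pvStepA, hop, h2]
      have hfst : (pvStepA ST (s, l)).1 = ST.1 + pvFlushB 0 (some l) s ST.2 := by
        by_cases h2 : ST.2 = [] <;> simp [pvStepA, pvFlushB, hop, h2]
      rw [hsnd, hfst, List.append_nil, List.nil_append,
        pvFlushB_split t op opstr nums]
      ring
    · by_cases hact : PySem.Str.replace s " " "" = ""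
      · have hstep : pvStepB (t, op, opstr, nums) (s, l) = (t, op, opstr, nums) := by
          simp [pvStepB, hop, hact]
        have hA : pvStepA ST (s, l) = ST := by simp [pvStepA, hop, hact]
        rw [hstep, hA, ih]
      · have hstep : pvStepB (t, op, opstr, nums) (s, l) = (t, op, opstr, nums ++ [s]) := by
          simp [pvStepB, hop, hact]
        have hA : pvStepA ST (s, l) = (ST.1, ST.2 ++ [s]) := by
          simp [pvStepA, hop, hact]
        rw [hstep, ih, hA]
        have hperm := pvFlushB_perm op opstr
          (List.Perm.append_left nums (List.perm_append_comm (l₁ := [s]) (l₂ := ST.2)))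
        show t + ST.1 + pvFlushB 0 op opstr (nums ++ [s] ++ ST.2)
            = t + ST.1 + pvFlushB 0 op opstr (nums ++ (ST.2 ++ [s]))
        rw [List.append_assoc, hperm]

-- for each column, A indexes rows of `matrix` by counter while B maps over matrix[:-1]
theorem colRows_eq (matrix : List (List String)) (hm : matrix ≠ []) (c : Int) :
    (PySem.List.pyRange 0 ((matrix.length : Int) - 1) 1).map (fun r => pvCellA matrix r c)
      = matrix.dropLast.map (fun row => (PySem.List.pyGet? row c).getD "") := by
  have hlen : 0 < matrix.length := List.length_pos_iff.mpr hm
  have hdl : matrix.dropLast.length = matrix.length - 1 := List.length_dropLast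
  have hcast : (matrix.length : Int) - 1 = ((matrix.dropLast.length : Nat) : Int) := by omega
  rw [hcast]
  have hcell : ∀ r ∈ PySem.List.pyRange 0 ((matrix.dropLast.length : Nat) : Int) 1,
      pvCellA matrix r c
        = (fun row => (PySem.List.pyGet? row c).getD "") (PySem.List.pyGetD matrix.dropLast r []) := by
    intro r hr
    rw [PySem.List.mem_pyRange_one] at hr
    have hrl' : r.toNat < matrix.length := by omega
    show (PySem.List.pyGet? ((PySem.List.pyGet? matrix r).getD []) c).getD ""
        = (PySem.List.pyGet? (PySem.List.pyGetD matrix.dropLast r []) c).getD ""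
    have h1 : (PySem.List.pyGet? matrix r).getD [] = matrix[r.toNat] := by
      rw [PySem.List.pyGet?_of_nonneg matrix hr.1, List.getElem?_eq_getElem hrl']
      rfl
    have h2 : PySem.List.pyGetD matrix.dropLast r [] = matrix.dropLast[r.toNat] :=
      PySem.List.pyGetD_eq_getElem _ _ hr.1 hr.2
    rw [h1, h2, List.getElem_dropLast]
  rw [List.map_congr_left hcell]
  conv_rhs => rw [← PySem.List.map_pyGetD_pyRange_zero' matrix.dropLast ([] : List String)]
  rw [List.map_map]
  rfl

-- inside Pre_, B's zipped column/last-row pairs are exactly the pvPairB pairs left-to-right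
theorem pairs_eq (matrix : List (List String)) (hm : matrix ≠ [])
    (hrows : ∀ row ∈ matrix, (matrix.headD []).length ≤ row.length) :
    (((PySem.List.pyRange 0 (((matrix.headD []).length : Int)) 1).map (fun c =>
        PySem.Str.join "" ((PySem.List.slice matrix none (some (-1))).map
          (fun row => (PySem.List.pyGet? row c).getD "")))).zip
      ((PySem.List.pyGet? matrix (-1)).getD []))
    = (PySem.List.pyRange 0 (((matrix.headD []).length : Int)) 1).map (pvPairB matrix) := by
  have hlen : 0 < matrix.length := List.length_pos_iff.mpr hm
  have hbottom : (PySem.List.pyGet? matrix (-1)).getD [] = matrix.getLast hm := by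
    rw [PySem.List.pyGet?_neg_one, List.getLast?_eq_some_getLast hm]; rfl
  have hbl : (matrix.headD []).length ≤ (matrix.getLast hm).length :=
    hrows _ (List.getLast_mem hm)
  have hlast : matrix.getLast hm = matrix[matrix.length - 1]'(by omega) :=
    List.getLast_eq_getElem hm
  have hrlen : (PySem.List.pyRange 0 (((matrix.headD []).length : Int)) 1).length
      = (matrix.headD []).length := by
    rw [PySem.List.length_pyRange_one]; omega
  apply List.ext_getElem
  · simp only [List.length_zip, List.length_map, hrlen, hbottom]
    omega
  · intro k hk1 hk2
    simp only [List.length_zip, List.length_map, hrlen, hbottom] at hk1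
    have hkw : k < (matrix.headD []).length := by omega
    have hkb : k < (matrix[matrix.length - 1]'(by omega)).length := by
      rw [← hlast]; omega
    simp only [List.getElem_zip, List.getElem_map]
    rw [PySem.List.getElem_pyRange_one]
    simp only [zero_add]
    have hcastN : (matrix.length : Int) - 1 = ((matrix.length - 1 : Nat) : Int) := by omega
    have hcell : pvCellA matrix ((matrix.length : Int) - 1) (k : Int)
        = (matrix[matrix.length - 1]'(by omega))[k]'hkb := by
      show (PySem.List.pyGet? ((PySem.List.pyGet? matrix ((matrix.length : Int) - 1)).getD [])
        (k : Int)).getD "" = _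
      rw [hcastN]
      simp only [PySem.List.pyGet?_natCast]
      rw [List.getElem?_eq_getElem (show matrix.length - 1 < matrix.length by omega)]
      simp only [Option.getD_some]
      rw [List.getElem?_eq_getElem hkb]
      rfl
    simp only [pvPairB, Prod.mk.injEq]
    constructor
    · rw [PySem.List.slice_to_neg_one, colRows_eq matrix hm (k : Int)]
    · simp only [hbottom, hcell]
      exact List.getElem_of_eq hlast (by omega)

theorem ports_eq (matrix : List (List String)) (h : Pre_operateSpecial matrix) :
    operateSpecial matrix = operateSpecial_alt matrix := by
  obtain ⟨hm, hrows, -⟩ := h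
  have hlen : 0 < matrix.length := List.length_pos_iff.mpr hm
  have hhead : (PySem.List.pyGet? matrix 0).getD [] = matrix.headD [] := by
    cases matrix with
    | nil => rfl
    | cons r rs => rw [PySem.List.pyGet?_zero_cons]; rfl
  rw [operateSpecial, operateSpecial_alt]
  simp only [hhead]
  rw [pairs_eq matrix hm hrows]
  cases hw : (matrix.headD []).length with
  | zero =>
    simp only [Nat.cast_zero]
    rw [PySem.List.pyRange_one_eq_nil (by omega : (0 : Int) ≤ 0)]
    norm_num [pvWhileA, pvFlushB]
  | succ k =>
    have h1 : ((k + 1 : Nat) : Int) - 1 = (k : Int) := by omega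
    have h2 : ((k : Nat) : Int).toNat + 1 = k + 1 := by omega
    rw [h1, h2, pvWhileA_eq matrix hm k 0 [] (k + 1) (by omega)]
    have hrev : PySem.List.pyRange (k : Int) (-1) (-1)
        = (PySem.List.pyRange 0 ((k + 1 : Nat) : Int) 1).reverse := by
      rw [PySem.List.pyRange_neg_one_eq_reverse]
      norm_num
    rw [hrev, List.map_reverse, List.foldl_reverse]
    have hB := foldl_stepB_eq
      ((PySem.List.pyRange 0 ((k + 1 : Nat) : Int) 1).map (pvPairB matrix)) 0 none "" []
    unfold pvFinish at hB
    rw [hB]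
    simp [pvFlushB]

-- ===== VERDICT (by name: the statement is the Claim_ definition above) =====
theorem operateSpecial_spec : Claim_equal_operateSpecial := by
  intro matrix _ hpre
  unfold Spec_operateSpecial
  exact ports_eq matrix hpre
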